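-- pv_equiv track=rewrite | github.com/adrianaav99/masters-thesis | MIniAES_encryptor.py | mini_aes_encrypt
-- ===== SOURCE A (Python) =====
-- def sbox_substitution(nibble):
--     sbox = {
--         0x0: 0xE, 0x1: 0x3, 0x2: 0x4, 0x3: 0x8,
--         0x4: 0x1, 0x5: 0xC, 0x6: 0xA, 0x7: 0xF,
--         0x8: 0x7, 0x9: 0xD, 0xA: 0x9, 0xB: 0x6,
--         0xC: 0xB, 0xD: 0x2, 0xE: 0x0, 0xF: 0x5
--     }
--     return sbox[nibble]
--
-- def split_nibbles(word):
--     return [(word >> 12) & 0xF, (word >> 8) & 0xF, (word >> 4) & 0xF, word & 0xF]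
--
-- def join_nibbles(nibbles):
--     return (nibbles[0] << 12) | (nibbles[1] << 8) | (nibbles[2] << 4) | nibbles[3]
--
-- def shift_rows(state):
--     # Input: [n0, n1, n2, n3]
--     # Output after shift: [n0, n3, n2, n1]
--     return [state[0], state[3], state[2], state[1]]
--
-- def mix_columns(state):
--     # MixColumns defined over GF(2^4), with fixed matrix multiplication
--     def gf_mult(a, b):
--         IRR_POLY = 0b10011  # x^4 + x + 1 irreductible polynomial in GF(2^4)
--         res = 0
--         for i in range(4):
--             if (b >> i) & 1:
--                 res ^= a << i
--         for i in range(7, 3, -1):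
--             if (res >> i) & 1:
--                 res ^= IRR_POLY << (i - 4)
--         return res & 0xF
--
--     n0 = gf_mult(3, state[0]) ^ gf_mult(2, state[1])
--     n1 = gf_mult(2, state[0]) ^ gf_mult(3, state[1])
--     n2 = gf_mult(3, state[2]) ^ gf_mult(2, state[3])
--     n3 = gf_mult(2, state[2]) ^ gf_mult(3, state[3])
--     return [n0, n1, n2, n3]
--
-- def mini_aes_encrypt(plaintext, key):
--     # Split into nibbles
--     pt = split_nibbles(plaintext) # list of 4 nibbles, esch 4 bits
--     k = split_nibbles(key) # list of 4 nibbles, esch 4 bits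
--
--     # Initial AddRoundKey
--     state = [p ^ k[i] for i, p in enumerate(pt)]
--
--     # Round 1
--     state = [sbox_substitution(n) for n in state]
--     state = shift_rows(state)
--     state = mix_columns(state)
--     state = [state[i] ^ k[i] for i in range(4)]
--
--     # Round 2
--     state = [sbox_substitution(n) for n in state]
--     state = shift_rows(state)
--     state = [state[i] ^ k[i] for i in range(4)]
--
--     # Join nibbles back
--     ciphertext = join_nibbles(state)
--     return ciphertext
-- ===== SOURCE B (Python) =====
-- def mini_aes_encrypt(plaintext, key):
--     SBOX = [0xE, 0x3, 0x4, 0x8, 0x1, 0xC, 0xA, 0xF,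
--             0x7, 0xD, 0x9, 0x6, 0xB, 0x2, 0x0, 0x5]
--
--     def mul2(a):
--         # closed-form xtime in GF(2^4) with x^4 + x + 1
--         return ((a << 1) ^ (0x3 if a & 0x8 else 0)) & 0xF
--
--     def mul3(a):
--         return mul2(a) ^ a
--
--     def nib(w, i):
--         return (w >> (12 - 4 * i)) & 0xF
--
--     k0, k1, k2, k3 = nib(key, 0), nib(key, 1), nib(key, 2), nib(key, 3)
--
--     # initial AddRoundKey fused with round-1 SubNibbles
--     s0 = SBOX[nib(plaintext, 0) ^ k0]
--     s1 = SBOX[nib(plaintext, 1) ^ k1]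
--     s2 = SBOX[nib(plaintext, 2) ^ k2]
--     s3 = SBOX[nib(plaintext, 3) ^ k3]
--
--     # ShiftRows (swap nibbles 1 and 3) folded into MixColumns, then AddRoundKey
--     t0 = mul3(s0) ^ mul2(s3) ^ k0
--     t1 = mul2(s0) ^ mul3(s3) ^ k1
--     t2 = mul3(s2) ^ mul2(s1) ^ k2
--     t3 = mul2(s2) ^ mul3(s1) ^ k3
--
--     # round 2: SubNibbles, ShiftRows folded into the indexing, AddRoundKey
--     u0 = SBOX[t0] ^ k0
--     u1 = SBOX[t3] ^ k1
--     u2 = SBOX[t2] ^ k2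
--     u3 = SBOX[t1] ^ k3
--
--     return (u0 << 12) | (u1 << 8) | (u2 << 4) | u3
-- ===== Notes on version B (the rewrite author's own statement) =====
-- stated objective: simpler
-- what changed: Replaced the loop-based GF(2^4) shift-and-reduce multiplier with a closed-form xtime (mul2/mul3), the S-box dict with a flat list, and the list/enumerate/range plumbing with an unrolled straight-line computation over the four nibbles.
import Mathlib
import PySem

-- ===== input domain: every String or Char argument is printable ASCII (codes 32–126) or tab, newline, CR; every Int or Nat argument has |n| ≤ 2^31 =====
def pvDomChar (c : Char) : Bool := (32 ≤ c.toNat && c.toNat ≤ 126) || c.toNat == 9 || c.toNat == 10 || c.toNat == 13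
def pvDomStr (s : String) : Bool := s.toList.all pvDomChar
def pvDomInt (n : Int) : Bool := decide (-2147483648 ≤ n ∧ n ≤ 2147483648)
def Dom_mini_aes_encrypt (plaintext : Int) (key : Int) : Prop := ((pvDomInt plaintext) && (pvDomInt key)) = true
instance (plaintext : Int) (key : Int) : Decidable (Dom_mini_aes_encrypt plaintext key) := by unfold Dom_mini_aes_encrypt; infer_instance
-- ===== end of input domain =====

-- B keeps A's round pipeline but replaces the loop-based GF(2^4) multiplier with a closed-form
-- xtime (mul2/mul3), the S-box dict with a flat list, and the list/enumerate plumbing with an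
-- unrolled straight-line computation over the four nibbles (objective: simpler).

-- ===== PORT A =====
-- sbox_substitution: the dict literal; lookup sbox[nibble] is always a hit on reachable
-- inputs (nibble is n & 0xF ∈ [0,16)), so the .getD 0 default is never taken there.
def pvSboxDict : PySem.Dict Int Int :=
  PySem.Dict.ofList [(0, 14), (1, 3), (2, 4), (3, 8), (4, 1), (5, 12), (6, 10), (7, 15),
                     (8, 7), (9, 13), (10, 9), (11, 6), (12, 11), (13, 2), (14, 0), (15, 5)]

def pvSboxSubstitution (nibble : Int) : Int := (pvSboxDict.get? nibble).getD 0

def pvSplitNibbles (word : Int) : List Int :=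
  [PySem.Int.band (word >>> (12 : Nat)) 15, PySem.Int.band (word >>> (8 : Nat)) 15,
   PySem.Int.band (word >>> (4 : Nat)) 15, PySem.Int.band word 15]

def pvJoinNibbles (nibbles : List Int) : Int :=
  PySem.Int.bor (PySem.Int.bor (PySem.Int.bor ((PySem.List.pyGetD nibbles 0 0) <<< (12 : Nat))
    ((PySem.List.pyGetD nibbles 1 0) <<< (8 : Nat))) ((PySem.List.pyGetD nibbles 2 0) <<< (4 : Nat)))
    (PySem.List.pyGetD nibbles 3 0)

def pvShiftRows (state : List Int) : List Int :=
  [PySem.List.pyGetD state 0 0, PySem.List.pyGetD state 3 0,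
   PySem.List.pyGetD state 2 0, PySem.List.pyGetD state 1 0]

-- gf_mult: shift-and-accumulate then reduce by IRR_POLY = 0b10011, step for step
def pvGfMult (a b : Int) : Int :=
  let res := (PySem.List.pyRange 0 4 1).foldl
    (fun res i => if PySem.Int.band (b >>> i.toNat) 1 ≠ 0 then PySem.Int.bxor res (a <<< i.toNat) else res) 0
  let res := (PySem.List.pyRange 7 3 (-1)).foldl
    (fun res i => if PySem.Int.band (res >>> i.toNat) 1 ≠ 0 then PySem.Int.bxor res (19 <<< (i.toNat - 4)) else res) res
  PySem.Int.band res 15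

def pvMixColumns (state : List Int) : List Int :=
  [PySem.Int.bxor (pvGfMult 3 (PySem.List.pyGetD state 0 0)) (pvGfMult 2 (PySem.List.pyGetD state 1 0)),
   PySem.Int.bxor (pvGfMult 2 (PySem.List.pyGetD state 0 0)) (pvGfMult 3 (PySem.List.pyGetD state 1 0)),
   PySem.Int.bxor (pvGfMult 3 (PySem.List.pyGetD state 2 0)) (pvGfMult 2 (PySem.List.pyGetD state 3 0)),
   PySem.Int.bxor (pvGfMult 2 (PySem.List.pyGetD state 2 0)) (pvGfMult 3 (PySem.List.pyGetD state 3 0))]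

def mini_aes_encrypt (plaintext : Int) (key : Int) : Int :=
  let pt := pvSplitNibbles plaintext
  let k := pvSplitNibbles key
  let state := (PySem.List.enumerate pt 0).map (fun ip => PySem.Int.bxor ip.2 (PySem.List.pyGetD k ip.1 0))
  let state := state.map pvSboxSubstitution
  let state := pvShiftRows state
  let state := pvMixColumns state
  let state := (PySem.List.pyRange 0 4 1).map
    (fun i => PySem.Int.bxor (PySem.List.pyGetD state i 0) (PySem.List.pyGetD k i 0))
  let state := state.map pvSboxSubstitution
  let state := pvShiftRows state
  let state := (PySem.List.pyRange 0 4 1).map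
    (fun i => PySem.Int.bxor (PySem.List.pyGetD state i 0) (PySem.List.pyGetD k i 0))
  pvJoinNibbles state

-- ===== PORT B =====
-- flat S-box list; SBOX[n] is always a hit on reachable indices (n ∈ [0,16)), so .getD 0 is never taken
def pvSboxList : List Int := [14, 3, 4, 8, 1, 12, 10, 15, 7, 13, 9, 6, 11, 2, 0, 5]

def pvSb (n : Int) : Int := PySem.List.pyGetD pvSboxList n 0

def pvMul2 (a : Int) : Int :=
  PySem.Int.band (PySem.Int.bxor (a <<< (1 : Nat)) (if PySem.Int.band a 8 ≠ 0 then 3 else 0)) 15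

def pvMul3 (a : Int) : Int := PySem.Int.bxor (pvMul2 a) a

def pvNib (w : Int) (i : Nat) : Int := PySem.Int.band (w >>> (12 - 4 * i)) 15

def mini_aes_encrypt_alt (plaintext : Int) (key : Int) : Int :=
  let k0 := pvNib key 0; let k1 := pvNib key 1; let k2 := pvNib key 2; let k3 := pvNib key 3
  let s0 := pvSb (PySem.Int.bxor (pvNib plaintext 0) k0)
  let s1 := pvSb (PySem.Int.bxor (pvNib plaintext 1) k1)
  let s2 := pvSb (PySem.Int.bxor (pvNib plaintext 2) k2)
  let s3 := pvSb (PySem.Int.bxor (pvNib plaintext 3) k3)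
  let t0 := PySem.Int.bxor (PySem.Int.bxor (pvMul3 s0) (pvMul2 s3)) k0
  let t1 := PySem.Int.bxor (PySem.Int.bxor (pvMul2 s0) (pvMul3 s3)) k1
  let t2 := PySem.Int.bxor (PySem.Int.bxor (pvMul3 s2) (pvMul2 s1)) k2
  let t3 := PySem.Int.bxor (PySem.Int.bxor (pvMul2 s2) (pvMul3 s1)) k3
  let u0 := PySem.Int.bxor (pvSb t0) k0
  let u1 := PySem.Int.bxor (pvSb t3) k1
  let u2 := PySem.Int.bxor (pvSb t2) k2
  let u3 := PySem.Int.bxor (pvSb t1) k3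
  PySem.Int.bor (PySem.Int.bor (PySem.Int.bor (u0 <<< (12 : Nat)) (u1 <<< (8 : Nat))) (u2 <<< (4 : Nat))) u3

-- ===== PRECONDITION & SPEC =====
def Spec_mini_aes_encrypt (plaintext : Int) (key : Int) (out : Int) : Prop := out = mini_aes_encrypt_alt plaintext key
instance (plaintext : Int) (key : Int) (out : Int) : Decidable (Spec_mini_aes_encrypt plaintext key out) := by unfold Spec_mini_aes_encrypt; infer_instance

-- ===== CLAIM (what is proved, stated in full; the proofs are below) =====
def Claim_equal_mini_aes_encrypt : Prop := ∀ (plaintext : Int) (key : Int), Dom_mini_aes_encrypt plaintext key → Spec_mini_aes_encrypt plaintext key (mini_aes_encrypt plaintext key)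

-- ===== LEMMAS AND PROOFS =====
-- x & 15 is a nibble, for every Int x (two's-complement branch included)
lemma pv_band15_bounds (x : Int) : 0 ≤ PySem.Int.band x 15 ∧ PySem.Int.band x 15 < 16 := by
  unfold PySem.Int.band
  split_ifs with h1 h2 h2
  · have := Nat.and_le_right (n := x.toNat) (m := 15); push_cast; omega
  · omega
  · have := Nat.and_le_left (n := (15 : Int).toNat) (m := (-x - 1).toNat); push_cast; omega
  · omega

-- xor of two nibbles is a nibble
lemma pv_bxor_nib {a b : Int} (ha : 0 ≤ a ∧ a < 16) (hb : 0 ≤ b ∧ b < 16) :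
    0 ≤ PySem.Int.bxor a b ∧ PySem.Int.bxor a b < 16 := by
  obtain ⟨ha0, ha1⟩ := ha; obtain ⟨hb0, hb1⟩ := hb
  interval_cases a <;> interval_cases b <;> decide

-- on nibbles, A's dict S-box equals B's list S-box, and the value is a nibble
lemma pv_sbox_eq {n : Int} (h : 0 ≤ n ∧ n < 16) :
    pvSboxSubstitution n = pvSb n ∧ 0 ≤ pvSb n ∧ pvSb n < 16 := by
  obtain ⟨h0, h1⟩ := h; interval_cases n <;> decide

-- on nibbles, A's loop multiplier by 2 and 3 equals B's closed-form xtime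
lemma pv_gf2_eq {n : Int} (h : 0 ≤ n ∧ n < 16) :
    pvGfMult 2 n = pvMul2 n ∧ 0 ≤ pvMul2 n ∧ pvMul2 n < 16 := by
  obtain ⟨h0, h1⟩ := h; interval_cases n <;> decide

lemma pv_gf3_eq {n : Int} (h : 0 ≤ n ∧ n < 16) :
    pvGfMult 3 n = pvMul3 n ∧ 0 ≤ pvMul3 n ∧ pvMul3 n < 16 := by
  obtain ⟨h0, h1⟩ := h; interval_cases n <;> decide

-- ===== VERDICT (by name: the statement is the Claim_ definition above) =====
lemma pv_pg0 (a b c d e : Int) : PySem.List.pyGetD [a, b, c, d] 0 e = a := by simp [pysem]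
lemma pv_pg1 (a b c d e : Int) : PySem.List.pyGetD [a, b, c, d] 1 e = b := by simp [pysem]
lemma pv_pg2 (a b c d e : Int) : PySem.List.pyGetD [a, b, c, d] 2 e = c := by simp [pysem]
lemma pv_pg3 (a b c d e : Int) : PySem.List.pyGetD [a, b, c, d] 3 e = d := by simp [pysem]

set_option maxHeartbeats 2000000 in
theorem mini_aes_encrypt_spec : Claim_equal_mini_aes_encrypt := by
  intro plaintext key _
  unfold Spec_mini_aes_encrypt mini_aes_encrypt mini_aes_encrypt_alt
  have hr4 : PySem.List.pyRange 0 4 1 = [0, 1, 2, 3] := by decide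
  simp only [pvSplitNibbles, pvNib, Nat.reduceSub, Nat.reduceMul, Int.shiftRight_zero]
  generalize hP0 : PySem.Int.band (plaintext >>> (12 : Nat)) 15 = p0
  generalize hP1 : PySem.Int.band (plaintext >>> (8 : Nat)) 15 = p1
  generalize hP2 : PySem.Int.band (plaintext >>> (4 : Nat)) 15 = p2
  generalize hP3 : PySem.Int.band plaintext 15 = p3
  generalize hK0 : PySem.Int.band (key >>> (12 : Nat)) 15 = k0
  generalize hK1 : PySem.Int.band (key >>> (8 : Nat)) 15 = k1
  generalize hK2 : PySem.Int.band (key >>> (4 : Nat)) 15 = k2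
  generalize hK3 : PySem.Int.band key 15 = k3
  have hp0 := hP0 ▸ pv_band15_bounds (plaintext >>> (12 : Nat))
  have hp1 := hP1 ▸ pv_band15_bounds (plaintext >>> (8 : Nat))
  have hp2 := hP2 ▸ pv_band15_bounds (plaintext >>> (4 : Nat))
  have hp3 := hP3 ▸ pv_band15_bounds plaintext
  have hk0 := hK0 ▸ pv_band15_bounds (key >>> (12 : Nat))
  have hk1 := hK1 ▸ pv_band15_bounds (key >>> (8 : Nat))
  have hk2 := hK2 ▸ pv_band15_bounds (key >>> (4 : Nat))
  have hk3 := hK3 ▸ pv_band15_bounds key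
  simp only [pvShiftRows, pvMixColumns, pvJoinNibbles, hr4,
    PySem.List.enumerate_cons, PySem.List.enumerate_nil, List.map_cons, List.map_nil,
    Int.reduceAdd, pv_pg0, pv_pg1, pv_pg2, pv_pg3]
  -- S-box of the key-mixed nibbles
  obtain ⟨he0, hs0⟩ := pv_sbox_eq (pv_bxor_nib hp0 hk0)
  obtain ⟨he1, hs1⟩ := pv_sbox_eq (pv_bxor_nib hp1 hk1)
  obtain ⟨he2, hs2⟩ := pv_sbox_eq (pv_bxor_nib hp2 hk2)
  obtain ⟨he3, hs3⟩ := pv_sbox_eq (pv_bxor_nib hp3 hk3)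
  rw [he0, he1, he2, he3]
  -- MixColumns multipliers
  rw [(pv_gf2_eq hs0).1, (pv_gf3_eq hs0).1, (pv_gf2_eq hs1).1, (pv_gf3_eq hs1).1,
      (pv_gf2_eq hs2).1, (pv_gf3_eq hs2).1, (pv_gf2_eq hs3).1, (pv_gf3_eq hs3).1]
  -- round-2 S-box of the round-1 outputs
  have ht0 := pv_bxor_nib (pv_bxor_nib (pv_gf3_eq hs0).2 (pv_gf2_eq hs3).2) hk0
  have ht1 := pv_bxor_nib (pv_bxor_nib (pv_gf2_eq hs0).2 (pv_gf3_eq hs3).2) hk1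
  have ht2 := pv_bxor_nib (pv_bxor_nib (pv_gf3_eq hs2).2 (pv_gf2_eq hs1).2) hk2
  have ht3 := pv_bxor_nib (pv_bxor_nib (pv_gf2_eq hs2).2 (pv_gf3_eq hs1).2) hk3
  rw [(pv_sbox_eq ht0).1, (pv_sbox_eq ht1).1, (pv_sbox_eq ht2).1, (pv_sbox_eq ht3).1]
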